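-- pv_equiv track=rewrite | github.com/Brightini/Technical-Test | rarest_term.py | nth_most_rate
-- ===== SOURCE A (Python) =====
-- def nth_most_rate(list: list, n: int) -> int:
--     """ A function that computes and returns the nth
--     rarest term in a list of integers
--
--     Args:
--         list(list): a list of integers
--         n(int): the nth rarest term
--
--     Return:
--         The functon returns the nth rarest items.
--         Else None if the wrong value of n is passed
--         or the list is empty
--     """
--
--     # Each item in the list, with their corresponding number
--     # of appearances are stored in a dictionary to easily
--     # compute the rarest nth term
--     items_dict = {}
--     for item in list:
--         items_dict[item] = items_dict.get(item, 0) + 1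
--
--     items_count = len(items_dict)
--     sorted_items = sorted(items_dict.items(), key=lambda x: x[1])
--
--     if n > 0 and n <= items_count:
--         nth_item = sorted_items[n-1][0]
--         return nth_item
--     else:
--         return None
-- ===== SOURCE B (Python) =====
-- def nth_most_rate(list: list, n: int) -> int:
--     """Bucket-selection: group distinct items by their count and walk the
--     (few) distinct count values in increasing order instead of sorting all
--     distinct items."""
--     counts = {}
--     for item in list:
--         counts[item] = counts.get(item, 0) + 1
--     if n <= 0 or len(counts) < n:
--         return None
--     buckets = {}
--     for item, c in counts.items():
--         buckets.setdefault(c, []).append(item)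
--     remaining = n
--     for c in sorted(buckets):
--         b = buckets[c]
--         if remaining <= len(b):
--             return b[remaining - 1]
--         remaining -= len(b)
-- ===== Notes on version B (the rewrite author's own statement) =====
-- stated objective: alternative
-- what changed: Replaces sorting all distinct items by count with a bucket selection: group the distinct items by their count in a dict and walk the distinct count values (at most O(sqrt(m)) of them) in increasing order until the nth item is reached.
import Mathlib
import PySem

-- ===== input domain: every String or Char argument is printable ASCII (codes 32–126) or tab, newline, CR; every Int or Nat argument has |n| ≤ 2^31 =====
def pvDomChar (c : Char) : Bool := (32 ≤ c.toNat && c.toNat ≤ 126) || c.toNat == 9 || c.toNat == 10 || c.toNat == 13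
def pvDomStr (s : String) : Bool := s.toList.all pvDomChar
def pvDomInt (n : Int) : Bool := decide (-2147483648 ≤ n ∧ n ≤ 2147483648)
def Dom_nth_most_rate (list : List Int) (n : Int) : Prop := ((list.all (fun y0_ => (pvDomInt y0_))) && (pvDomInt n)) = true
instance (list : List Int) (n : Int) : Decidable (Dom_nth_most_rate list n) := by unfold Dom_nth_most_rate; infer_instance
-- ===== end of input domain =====

-- B replaces A's sort of all distinct items by a bucket selection over the distinct COUNT
-- values (grouped once, walked in increasing order); same return value everywhere.

-- ===== PORT A =====
-- literal port of Source A: count into a dict, sort the items by count (stable), index n-1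
def nth_most_rate (list : List Int) (n : Int) : Option Int :=
  let items_dict := list.foldl (fun d item => d.insert item (d.getD item (0:Int) + 1)) PySem.Dict.empty
  let items_count : Int := items_dict.size
  let sorted_items := PySem.List.sorted items_dict.items (fun x => x.2) false
  if n > 0 ∧ n ≤ items_count then
    (PySem.List.pyGet? sorted_items (n - 1)).map (fun p => p.1)  -- sorted_items[n-1][0]; the guard keeps the index in range
  else none

-- ===== PORT B =====
-- the 'for c in sorted(buckets): …' selection loop of Source B (buckets[c] is written as getD c
-- [], exact here since every c the loop visits is a key of buckets)
def selectBuckets (bk : PySem.Dict Int (List Int)) : List Int → Int → Option Int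
  | [], _ => none
  | c :: cs, remaining =>
    let b := bk.getD c []
    if remaining ≤ (b.length : Int) then PySem.List.pyGet? b (remaining - 1)
    else selectBuckets bk cs (remaining - b.length)

-- literal port of Source B: count, group the distinct items by count, walk counts in increasing order
def nth_most_rate_alt (list : List Int) (n : Int) : Option Int :=
  let counts := list.foldl (fun d item => d.insert item (d.getD item (0:Int) + 1)) PySem.Dict.empty
  if n ≤ 0 ∨ (counts.size : Int) < n then none
  else
    let buckets := counts.items.foldl (fun b p => b.modify p.2 [] (fun l => l ++ [p.1])) PySem.Dict.empty
    selectBuckets buckets (PySem.List.sorted buckets.keys (fun c => c) false) n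

-- ===== PRECONDITION & SPEC =====
def Spec_nth_most_rate (list : List Int) (n : Int) (out : Option Int) : Prop := out = nth_most_rate_alt list n
instance (list : List Int) (n : Int) (out : Option Int) : Decidable (Spec_nth_most_rate list n out) := by unfold Spec_nth_most_rate; infer_instance

-- ===== CLAIM (what is proved, stated in full; the proofs are below) =====
def Claim_equal_nth_most_rate : Prop := ∀ (list : List Int) (n : Int), Dom_nth_most_rate list n → Spec_nth_most_rate list n (nth_most_rate list n)

-- ===== LEMMAS AND PROOFS =====

-- insertBy steps (definitional)
theorem insertBy_cons_pos {α : Type} (b : α → α → Bool) (x y : α) (ys : List α) (h : b x y = true) :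
    PySem.List.insertBy b x (y :: ys) = x :: y :: ys := by simp [PySem.List.insertBy, h]

theorem insertBy_cons_neg {α : Type} (b : α → α → Bool) (x y : α) (ys : List α) (h : b x y = false) :
    PySem.List.insertBy b x (y :: ys) = y :: PySem.List.insertBy b x ys := by simp [PySem.List.insertBy, h]

-- x goes in front when it is before everything
theorem insertBy_all_before {α : Type} (b : α → α → Bool) (x : α) (ys : List α)
    (h : ∀ y ∈ ys, b x y = true) : PySem.List.insertBy b x ys = x :: ys := by
  cases ys with
  | nil => rfl
  | cons y ys => exact insertBy_cons_pos b x y ys (h y (List.mem_cons_self))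

-- x passes over a block it is not before
theorem insertBy_append_left {α : Type} (b : α → α → Bool) (x : α) (ys zs : List α)
    (h : ∀ y ∈ ys, b x y = false) :
    PySem.List.insertBy b x (ys ++ zs) = ys ++ PySem.List.insertBy b x zs := by
  induction ys with
  | nil => rfl
  | cons y ys ih =>
      rw [List.cons_append, insertBy_cons_neg b x y _ (h y List.mem_cons_self), ih]
      · rfl
      · exact fun y hy => h y (List.mem_cons_of_mem _ hy)

-- inserting x into a bucket concatenation when its key already has a bucket: x lands at the
-- end of its own bucket (stability)
theorem insertBy_flatMap_mem {α : Type} (key : α → Int) (K : List Int) (g : Int → List α) (x : α)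
    (hK : K.Pairwise (· < ·)) (hg : ∀ c ∈ K, ∀ y ∈ g c, key y = c) (hx : key x ∈ K) :
    PySem.List.insertBy (fun a b => decide (key a < key b)) x (K.flatMap g)
      = K.flatMap (fun c => if c = key x then g c ++ [x] else g c) := by
  induction K with
  | nil => cases hx
  | cons c K ih =>
      have hlt : ∀ c' ∈ K, c < c' := (List.pairwise_cons.mp hK).1
      have hK' := (List.pairwise_cons.mp hK).2
      have hgc : ∀ y ∈ g c, key y = c := hg c List.mem_cons_self
      have hg' : ∀ c' ∈ K, ∀ y ∈ g c', key y = c' :=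
        fun c' hc' => hg c' (List.mem_cons_of_mem _ hc')
      rw [List.flatMap_cons, List.flatMap_cons]
      by_cases hcx : c = key x
      · have h1 : ∀ y ∈ g c, decide (key x < key y) = false := by
          intro y hy
          have := hgc y hy
          simp [this, ← hcx]
        rw [insertBy_append_left _ _ _ _ h1]
        have h2 : ∀ y ∈ K.flatMap g, decide (key x < key y) = true := by
          intro y hy
          rcases List.mem_flatMap.mp hy with ⟨c', hc', hyc'⟩
          have hyk := hg' c' hc' y hyc'
          have := hlt _ hc'
          simp [hyk, ← hcx]; omega
        rw [insertBy_all_before _ _ _ h2, if_pos hcx]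
        have h3 : K.flatMap (fun c' => if c' = key x then g c' ++ [x] else g c') = K.flatMap g := by
          simp only [List.flatMap_def]
          refine congrArg List.flatten (List.map_congr_left ?_)
          intro c' hc'
          have := hlt _ hc'
          rw [if_neg (by intro h; omega)]
        rw [h3]; simp
      · have hxK : key x ∈ K := by
          rcases List.mem_cons.mp hx with h | h
          · exact absurd h.symm hcx
          · exact h
        have hclt : c < key x := hlt _ hxK
        have h1 : ∀ y ∈ g c, decide (key x < key y) = false := by
          intro y hy
          have := hgc y hy
          simp [this]; omega
        rw [insertBy_append_left _ _ _ _ h1, ih hK' hg' hxK, if_neg hcx]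

-- inserting x whose key is fresh: a new singleton bucket appears where the key sorts
theorem insertBy_flatMap_fresh {α : Type} (key : α → Int) (K : List Int) (g : Int → List α) (x : α)
    (hK : K.Pairwise (· < ·)) (hg : ∀ c ∈ K, ∀ y ∈ g c, key y = c) (hx : key x ∉ K) :
    PySem.List.insertBy (fun a b => decide (key a < key b)) x (K.flatMap g)
      = (PySem.List.insertBy (fun a b => decide (a < b)) (key x) K).flatMap
          (fun c => if c = key x then [x] else g c) := by
  induction K with
  | nil => simp [PySem.List.insertBy]
  | cons c K ih =>
      have hlt : ∀ c' ∈ K, c < c' := (List.pairwise_cons.mp hK).1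
      have hK' := (List.pairwise_cons.mp hK).2
      have hgc : ∀ y ∈ g c, key y = c := hg c List.mem_cons_self
      have hg' : ∀ c' ∈ K, ∀ y ∈ g c', key y = c' :=
        fun c' hc' => hg c' (List.mem_cons_of_mem _ hc')
      have hne : key x ≠ c := fun h => hx (by rw [h]; exact List.mem_cons_self)
      have hxK : key x ∉ K := fun h => hx (List.mem_cons_of_mem _ h)
      rw [List.flatMap_cons]
      by_cases hkc : key x < c
      · have h2 : ∀ y ∈ g c ++ K.flatMap g, decide (key x < key y) = true := by
          intro y hy
          rcases List.mem_append.mp hy with hy | hy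
          · have := hgc y hy; simp [this]; omega
          · rcases List.mem_flatMap.mp hy with ⟨c', hc', hyc'⟩
            have hyk := hg' c' hc' y hyc'
            have := hlt _ hc'
            simp [hyk]; omega
        rw [insertBy_all_before _ _ _ h2,
            insertBy_cons_pos _ _ _ _ (by simp [hkc]), List.flatMap_cons, List.flatMap_cons,
            if_pos rfl, if_neg (Ne.symm hne)]
        have h3 : K.flatMap (fun c' => if c' = key x then [x] else g c') = K.flatMap g := by
          simp only [List.flatMap_def]
          refine congrArg List.flatten (List.map_congr_left ?_)
          intro c' hc'
          rw [if_neg (fun h => hxK (by rw [← h]; exact hc'))]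
        rw [h3]; simp
      · have hclt : c < key x := by
          rcases lt_trichotomy c (key x) with h | h | h
          · exact h
          · exact absurd h.symm hne
          · exact absurd h hkc
        have h1 : ∀ y ∈ g c, decide (key x < key y) = false := by
          intro y hy
          have := hgc y hy
          simp [this]; omega
        rw [insertBy_append_left _ _ _ _ h1, ih hK' hg' hxK,
            insertBy_cons_neg _ _ _ _ (by simp; omega), List.flatMap_cons,
            if_neg (Ne.symm hne)]

-- the characterisation of Python's stable sort that links the two programs: sorting by key =
-- concatenating the key-buckets in increasing key order
theorem stable_bucket {α : Type} (l : List α) (key : α → Int) :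
    PySem.List.sorted l key false
      = (PySem.List.sorted (PySem.Set.ofList (l.map key)) (fun c => c) false).flatMap
          (fun c => l.filter (fun x => key x == c)) := by
  induction l using List.reverseRecOn with
  | nil => rfl
  | append_singleton l x ih =>
      have hstep : PySem.List.sorted (l ++ [x]) key false
          = PySem.List.insertBy (fun a b => decide (key a < key b)) x
              (PySem.List.sorted l key false) := by
        rw [PySem.List.sorted_eq_foldl_insertBy, PySem.List.sorted_eq_foldl_insertBy,
            List.foldl_append]
        rfl
      have hmap : (l ++ [x]).map key = l.map key ++ [key x] := by simp
      have hset : PySem.Set.ofList (l.map key ++ [key x])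
          = PySem.Set.add (PySem.Set.ofList (l.map key)) (key x) := by
        rw [PySem.Set.ofList_eq_foldl, PySem.Set.ofList_eq_foldl, List.foldl_append]
        rfl
      have hK := PySem.List.sorted_ofList_pairwise_lt (l.map key)
      have hg : ∀ c ∈ PySem.List.sorted (PySem.Set.ofList (l.map key)) (fun c => c) false,
          ∀ y ∈ l.filter (fun z => key z == c), key y = c := by
        intro c _ y hy
        exact beq_iff_eq.mp (List.mem_filter.mp hy).2
      have hfsplit : ∀ c : Int, (l ++ [x]).filter (fun z => key z == c)
          = l.filter (fun z => key z == c) ++ (if c = key x then [x] else []) := by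
        intro c
        rw [List.filter_append]
        congr 1
        by_cases h : c = key x
        · simp [List.filter, h]
        · simp [List.filter, beq_eq_false_iff_ne.mpr (fun h' : key x = c => h h'.symm)]
          exact h
      by_cases hmem : key x ∈ l.map key
      · have hadd : PySem.Set.add (PySem.Set.ofList (l.map key)) (key x)
            = PySem.Set.ofList (l.map key) := by
          simp [PySem.Set.add, PySem.Set.contains, (PySem.Set.mem_ofList _ _).mpr hmem]
        have hxK : key x ∈ PySem.List.sorted (PySem.Set.ofList (l.map key)) (fun c => c) false :=
          (PySem.List.mem_sorted _ _ _ _).mpr ((PySem.Set.mem_ofList _ _).mpr hmem)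
        rw [hstep, ih, insertBy_flatMap_mem key _ _ x hK hg hxK, hmap, hset, hadd]
        have hfun : (fun c => List.filter (fun z => key z == c) (l ++ [x]))
            = (fun c => if c = key x then List.filter (fun z => key z == c) l ++ [x]
                else List.filter (fun z => key z == c) l) := by
          funext c
          rw [hfsplit c]
          by_cases h : c = key x
          · simp [h]
          · simp [h]
        rw [hfun]
      · have hadd : PySem.Set.add (PySem.Set.ofList (l.map key)) (key x)
            = PySem.Set.ofList (l.map key) ++ [key x] := by
          have : key x ∉ PySem.Set.ofList (l.map key) :=
            fun h => hmem ((PySem.Set.mem_ofList _ _).mp h)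
          simp [PySem.Set.add, PySem.Set.contains, this]
        have hxK : key x ∉ PySem.List.sorted (PySem.Set.ofList (l.map key)) (fun c => c) false :=
          fun h => hmem ((PySem.Set.mem_ofList _ _).mp ((PySem.List.mem_sorted _ _ _ _).mp h))
        have hsortK : PySem.List.sorted (PySem.Set.ofList (l.map key) ++ [key x]) (fun c => c) false
            = PySem.List.insertBy (fun a b => decide (a < b)) (key x)
                (PySem.List.sorted (PySem.Set.ofList (l.map key)) (fun c => c) false) := by
          rw [PySem.List.sorted_eq_foldl_insertBy, PySem.List.sorted_eq_foldl_insertBy,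
              List.foldl_append]
          rfl
        have hfilnil : l.filter (fun z => key z == key x) = [] := by
          rw [List.filter_eq_nil_iff]
          intro y hy hb
          exact hmem (List.mem_map.mpr ⟨y, hy, beq_iff_eq.mp hb⟩)
        rw [hstep, ih, insertBy_flatMap_fresh key _ _ x hK hg hxK, hmap, hset, hadd, hsortK]
        have hfun : (fun c => List.filter (fun z => key z == c) (l ++ [x]))
            = (fun c => if c = key x then [x] else List.filter (fun z => key z == c) l) := by
          funext c
          rw [hfsplit c]
          by_cases h : c = key x
          · simp [h, hfilnil]
          · simp [h]
        rw [hfun]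

-- walking the buckets in order n steps is indexing their concatenation at n-1
theorem selectBuckets_eq_pyGet? (bk : PySem.Dict Int (List Int)) (K : List Int) :
    ∀ rem : Int, 1 ≤ rem →
      selectBuckets bk K rem
        = PySem.List.pyGet? (K.flatMap (fun c => bk.getD c [])) (rem - 1) := by
  induction K with
  | nil => intro rem _; simp [selectBuckets, PySem.List.pyGet?, PySem.List.pyIdx?]
  | cons c K ih =>
      intro rem hrem
      simp only [selectBuckets, List.flatMap_cons]
      set b := bk.getD c [] with hb
      by_cases hle : rem ≤ (b.length : Int)
      · rw [if_pos hle]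
        have hk : rem - 1 = ((rem - 1).toNat : Int) := by omega
        rw [hk, PySem.List.pyGet?_natCast, PySem.List.pyGet?_natCast,
            List.getElem?_append_left (by omega)]
      · rw [if_neg hle, ih (rem - b.length) (by omega)]
        have h1 : rem - 1 = ((rem - 1).toNat : Int) := by omega
        have h2 : rem - b.length - 1 = ((rem - b.length - 1).toNat : Int) := by omega
        rw [h1, h2, PySem.List.pyGet?_natCast, PySem.List.pyGet?_natCast,
            List.getElem?_append_right (by omega)]
        congr 1
        omega

theorem pyGet?_map {α β : Type} (f : α → β) (xs : List α) (i : Int) :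
    PySem.List.pyGet? (xs.map f) i = (PySem.List.pyGet? xs i).map f := by
  unfold PySem.List.pyGet?
  rw [List.length_map]
  cases PySem.List.pyIdx? xs.length i <;> simp

-- ===== VERDICT (by name: the statement is the Claim_ definition above) =====
theorem nth_most_rate_spec : Claim_equal_nth_most_rate := by
  intro list n _
  unfold Spec_nth_most_rate nth_most_rate nth_most_rate_alt
  dsimp only
  set d := list.foldl (fun d item => d.insert item (d.getD item (0:Int) + 1)) PySem.Dict.empty with hd
  set buckets := d.items.foldl (fun b p => b.modify p.2 [] (fun l => l ++ [p.1]))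
      PySem.Dict.empty with hbuckets
  by_cases hn : n > 0 ∧ n ≤ (d.size : Int)
  · rw [if_pos hn, if_neg (by omega)]
    have hkeys : buckets.keys = PySem.Set.ofList (d.items.map (fun p => p.2)) := by
      rw [hbuckets, PySem.Dict.keys_foldl_modify_key d.items (fun p => p.2) []
            (fun _ p => fun l => l ++ [p.1]) PySem.Dict.empty,
          PySem.Dict.keys_empty, PySem.Set.ofList_eq_foldl]
      rfl
    have hgetD : ∀ c : Int, buckets.getD c []
        = (d.items.filter (fun p => p.2 == c)).map (fun p => p.1) := by
      intro c
      have hswap : buckets = (d.items.map Prod.swap).foldl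
          (fun b q => b.modify q.1 [] (fun l => l ++ [q.2])) PySem.Dict.empty := by
        rw [hbuckets, List.foldl_map]
        rfl
      rw [hswap, PySem.Dict.getD_foldl_modify_append, PySem.Dict.getD_empty, List.filter_map,
          List.map_map]
      rfl
    rw [stable_bucket d.items (fun p => p.2), ← pyGet?_map, List.map_flatMap,
        selectBuckets_eq_pyGet? buckets _ n (by omega), hkeys]
    have hfun2 : (fun c : Int => buckets.getD c [])
        = (fun c : Int => (d.items.filter (fun p => p.2 == c)).map (fun p => p.1)) :=
      funext hgetD
    rw [hfun2]
  · rw [if_neg hn, if_pos (by omega)]
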